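-- pv_equiv track=rewrite | github.com/cedricusureau/HLA_graph | src/write_eplet.py | purge_eplet_on_bead
-- ===== SOURCE A (Python) =====
-- def purge_eplet_on_bead(eplet_on_bead, eplet_on_link):
--     new_eplet_on_bead = {}
--     for i,j in eplet_on_bead.items():
--         new_eplet_on_bead[i] = list(j)
--
--     for bead, eplets in eplet_on_bead.items():
--         for eplet in eplets:
--             for couple in eplet_on_link.keys():
--                 if bead in couple:
--                     if eplet in eplet_on_link[couple]:
--                         if type(new_eplet_on_bead[bead]) == list:
--                             if eplet in new_eplet_on_bead[bead]:
--                                 new_eplet_on_bead[bead].remove(eplet)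
--
--     for i,j in new_eplet_on_bead.items():
--         if j is None:
--             new_eplet_on_bead[i] = set()
--         else:
--             new_eplet_on_bead[i] = set(j)
--
--     return new_eplet_on_bead
-- ===== SOURCE B (Python) =====
-- def purge_eplet_on_bead(eplet_on_bead, eplet_on_link):
--     banned = {}
--     for couple, couple_eplets in eplet_on_link.items():
--         for bead in couple:
--             banned.setdefault(bead, set()).update(couple_eplets)
--     no_ban = frozenset()
--     return {bead: {eplet for eplet in eplets if eplet not in banned.get(bead, no_ban)}
--             for bead, eplets in eplet_on_bead.items()}
-- ===== Notes on version B (the rewrite author's own statement) =====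
-- stated objective: faster
-- what changed: B precomputes one per-bead set of banned eplets from the links in a single pass and then builds each bead's result by one filtered comprehension, replacing A's nested bead-by-eplet-by-couple scan with repeated membership tests and list.remove calls.
import Mathlib
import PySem

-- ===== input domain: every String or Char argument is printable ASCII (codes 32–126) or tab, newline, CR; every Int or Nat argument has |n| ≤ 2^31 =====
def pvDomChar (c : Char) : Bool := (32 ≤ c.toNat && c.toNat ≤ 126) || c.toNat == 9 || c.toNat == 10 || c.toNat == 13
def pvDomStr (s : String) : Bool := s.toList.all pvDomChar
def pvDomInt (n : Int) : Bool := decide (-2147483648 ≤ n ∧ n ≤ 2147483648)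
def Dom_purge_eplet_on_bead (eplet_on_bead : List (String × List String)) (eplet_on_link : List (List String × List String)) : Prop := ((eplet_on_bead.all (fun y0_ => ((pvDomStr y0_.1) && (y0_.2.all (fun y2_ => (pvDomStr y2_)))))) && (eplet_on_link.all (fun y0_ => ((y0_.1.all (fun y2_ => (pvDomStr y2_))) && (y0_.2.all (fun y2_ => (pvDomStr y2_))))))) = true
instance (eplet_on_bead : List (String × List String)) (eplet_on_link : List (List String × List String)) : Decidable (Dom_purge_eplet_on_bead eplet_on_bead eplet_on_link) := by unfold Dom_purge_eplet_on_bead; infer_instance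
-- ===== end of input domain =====

-- B replaces A's nested bead×eplet×couple removal scan by one precomputed per-bead banned-eplet set
-- and a single filtering pass per bead (a different, asymptotically faster algorithm).

-- ===== PORT A =====
-- One step of A's innermost 'for couple in eplet_on_link.keys()' loop.  'eplet_on_link[couple]' is the
-- item's own value (a Python dict has unique keys, see Pre_), and 'type(new_eplet_on_bead[bead]) == list'
-- is always true since every value was built by list(j), so that test needs no further modelling.
def pvCoupleStep (bead eplet : String) (d : PySem.Dict String (List String)) (cp : List String × List String) : PySem.Dict String (List String) :=
  if cp.1.contains bead then
    if cp.2.contains eplet then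
      match PySem.Dict.get? d bead with      -- new_eplet_on_bead[bead]; never missing: bead is a key
      | some l =>
          if l.contains eplet then
            PySem.Dict.insert d bead ((PySem.List.remove? l eplet).getD l)  -- .remove(eplet)
          else d
      | none => d
    else d
  else d

def purge_eplet_on_bead (eplet_on_bead : List (String × List String)) (eplet_on_link : List (List String × List String)) : List (String × List String) :=
  -- new_eplet_on_bead = {}; for i, j in eplet_on_bead.items(): new_eplet_on_bead[i] = list(j)
  let new0 : PySem.Dict String (List String) :=
    eplet_on_bead.foldl (fun d p => PySem.Dict.insert d p.1 p.2) PySem.Dict.empty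
  -- the triple removal loop over beads × eplets × couples
  let new1 : PySem.Dict String (List String) :=
    eplet_on_bead.foldl
      (fun d p => p.2.foldl (fun d eplet => eplet_on_link.foldl (pvCoupleStep p.1 eplet) d) d) new0
  -- final loop: j is never None, so every value becomes set(j)
  (PySem.Dict.items new1).map (fun p => (p.1, PySem.Set.ofList p.2))

-- ===== PORT B =====
def purge_eplet_on_bead_alt (eplet_on_bead : List (String × List String)) (eplet_on_link : List (List String × List String)) : List (String × List String) :=
  -- banned.setdefault(bead, set()).update(couple_eplets) for every bead of every couple
  let banned : PySem.Dict String (PySem.Set String) :=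
    eplet_on_link.foldl
      (fun d cp => cp.1.foldl
        (fun d bead =>
          PySem.Dict.insert d bead
            (PySem.Set.update (PySem.Dict.getD d bead PySem.Set.empty) cp.2)) d)
      PySem.Dict.empty
  -- {bead: {e for e in eplets if e not in banned.get(bead, no_ban)} for bead, eplets in eplet_on_bead.items()}
  PySem.Dict.items
    (eplet_on_bead.foldl
      (fun d p =>
        PySem.Dict.insert d p.1
          (PySem.Set.ofList (p.2.filter (fun e =>
            !(PySem.Set.contains (PySem.Dict.getD banned p.1 PySem.Set.empty) e)))))
      PySem.Dict.empty)

-- ===== PRECONDITION & SPEC =====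
-- Pre_ requires distinct keys in both association lists: the two arguments are Python dicts, which
-- cannot hold duplicate keys, so a duplicate-key list represents no input A ever receives.
def Pre_purge_eplet_on_bead (eplet_on_bead : List (String × List String)) (eplet_on_link : List (List String × List String)) : Prop :=
  (eplet_on_bead.map Prod.fst).Nodup ∧ (eplet_on_link.map Prod.fst).Nodup
instance (eplet_on_bead : List (String × List String)) (eplet_on_link : List (List String × List String)) : Decidable (Pre_purge_eplet_on_bead eplet_on_bead eplet_on_link) := by unfold Pre_purge_eplet_on_bead; infer_instance

def pvWitness_purge_eplet_on_bead : (List (String × List String)) × (List (List String × List String)) :=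
  ([("b1", ["e1", "e2"]), ("b2", ["e3"])], [(["b1", "b2"], ["e1", "e3"])])

def Spec_purge_eplet_on_bead (eplet_on_bead : List (String × List String)) (eplet_on_link : List (List String × List String)) (out : List (String × List String)) : Prop := out = purge_eplet_on_bead_alt eplet_on_bead eplet_on_link
instance (eplet_on_bead : List (String × List String)) (eplet_on_link : List (List String × List String)) (out : List (String × List String)) : Decidable (Spec_purge_eplet_on_bead eplet_on_bead eplet_on_link out) := by unfold Spec_purge_eplet_on_bead; infer_instance

-- ===== CLAIM (what is proved, stated in full; the proofs are below) =====
def Claim_equal_purge_eplet_on_bead : Prop := ∀ (eplet_on_bead : List (String × List String)) (eplet_on_link : List (List String × List String)), Dom_purge_eplet_on_bead eplet_on_bead eplet_on_link → Pre_purge_eplet_on_bead eplet_on_bead eplet_on_link → Spec_purge_eplet_on_bead eplet_on_bead eplet_on_link (purge_eplet_on_bead eplet_on_bead eplet_on_link)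

-- ===== LEMMAS AND PROOFS =====

def pvBad (link : List (List String × List String)) (bead e : String) : Bool :=
  link.any (fun cp => cp.1.contains bead && cp.2.contains e)

def pvValStep (bead eplet : String) (v : List String) (cp : List String × List String) : List String :=
  if cp.1.contains bead then
    if cp.2.contains eplet then
      if v.contains eplet then v.erase eplet else v
    else v
  else v

theorem pvValStep_cases (bead e : String) (v : List String) (cp : List String × List String) :
    pvValStep bead e v cp = v ∨
      ((cp.1.contains bead && cp.2.contains e) = true ∧ e ∈ v ∧ pvValStep bead e v cp = v.erase e) := by
  unfold pvValStep
  split_ifs with h1 h2 h3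
  · exact Or.inr ⟨by rw [h1, h2, Bool.and_self], by simpa using h3, rfl⟩
  all_goals exact Or.inl rfl

theorem pvFilter_erase (q : String → Bool) (e : String) (hq : q e = false) :
    ∀ v : List String, (v.erase e).filter q = v.filter q := by
  intro v
  induction v with
  | nil => rfl
  | cons a t ih =>
    by_cases ha : a = e
    · subst ha; simp [List.erase_cons_head, hq]
    · rw [List.erase_cons_tail (by simpa using ha)]
      simp only [List.filter_cons, ih]

theorem pvValFold_count_le (bead e : String) (link : List (List String × List String)) :
    ∀ (v : List String) (x : String),
      (link.foldl (pvValStep bead e) v).count x ≤ v.count x := by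
  intro v x
  induction link generalizing v with
  | nil => simp
  | cons cp rest ih =>
    simp only [List.foldl_cons]
    rcases pvValStep_cases bead e v cp with h | ⟨_, _, h⟩
    · rw [h]; exact ih v
    · rw [h]; exact le_trans (ih _) (List.Sublist.count_le x (List.erase_sublist))

theorem pvValFold_count_other (bead e : String) (link : List (List String × List String)) :
    ∀ (v : List String) (x : String), x ≠ e →
      (link.foldl (pvValStep bead e) v).count x = v.count x := by
  intro v x hx
  induction link generalizing v with
  | nil => rfl
  | cons cp rest ih =>
    simp only [List.foldl_cons]
    rcases pvValStep_cases bead e v cp with h | ⟨_, _, h⟩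
    · rw [h]; exact ih v
    · rw [h, ih _, List.count_erase_of_ne hx]

theorem pvValFold_noop (bead e : String) (link : List (List String × List String))
    (hbad : pvBad link bead e = false) :
    ∀ v : List String, link.foldl (pvValStep bead e) v = v := by
  intro v
  induction link generalizing v with
  | nil => rfl
  | cons cp rest ih =>
    simp only [pvBad, List.any_cons, Bool.or_eq_false_iff] at hbad
    simp only [List.foldl_cons]
    have hstep : pvValStep bead e v cp = v := by
      unfold pvValStep
      split_ifs with h1 h2 h3
      · exact absurd (show (cp.1.contains bead && cp.2.contains e) = true by rw [h1, h2, Bool.and_self]) (by simp only [hbad.1, Bool.false_eq_true, not_false_eq_true])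
      all_goals rfl
    rw [hstep]
    exact ih (by simpa [pvBad] using hbad.2) v

theorem pvValFold_count_self (bead e : String) (link : List (List String × List String)) :
    ∀ v : List String, pvBad link bead e = true →
      (link.foldl (pvValStep bead e) v).count e ≤ v.count e - 1 := by
  intro v hbad
  induction link generalizing v with
  | nil => simp [pvBad] at hbad
  | cons cp rest ih =>
    simp only [List.foldl_cons]
    by_cases hm : (cp.1.contains bead && cp.2.contains e) = true
    · have hstep : pvValStep bead e v cp = if v.contains e then v.erase e else v := by
        unfold pvValStep
        simp only [Bool.and_eq_true] at hm
        rw [hm.1, hm.2]; simp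
      rw [hstep]
      by_cases hv : v.contains e
      · rw [if_pos hv]
        calc (rest.foldl (pvValStep bead e) (v.erase e)).count e
            ≤ (v.erase e).count e := pvValFold_count_le bead e rest _ e
          _ = v.count e - 1 := List.count_erase_self
      · have hv0 : v.count e = 0 := by
          simp only [List.count_eq_zero]
          simpa using hv
        rw [if_neg hv]
        have := pvValFold_count_le bead e rest v e
        omega
    · have hstep : pvValStep bead e v cp = v := by
        unfold pvValStep
        split_ifs with h1 h2 h3
        · exact absurd (show (cp.1.contains bead && cp.2.contains e) = true by rw [h1, h2, Bool.and_self]) (by simpa using hm)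
        all_goals rfl
      rw [hstep]
      have hrest : pvBad rest bead e = true := by
        simp only [pvBad, List.any_cons] at hbad ⊢
        rcases Bool.or_eq_true_iff.mp hbad with h | h
        · exact absurd h (by simpa using hm)
        · exact h
      exact ih _ hrest

theorem pvValFold_filter (bead e : String) (link : List (List String × List String))
    (q : String → Bool) (hq : q e = false) :
    ∀ v : List String, (link.foldl (pvValStep bead e) v).filter q = v.filter q := by
  intro v
  induction link generalizing v with
  | nil => rfl
  | cons cp rest ih =>
    simp only [List.foldl_cons]
    rcases pvValStep_cases bead e v cp with h | ⟨_, _, h⟩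
    · rw [h]; exact ih v
    · rw [h, ih _, pvFilter_erase q e hq]

theorem pvStream_filter (bead : String) (link : List (List String × List String)) :
    ∀ (s v : List String),
      (∀ e, pvBad link bead e = true → v.count e ≤ s.count e) →
      s.foldl (fun v e => link.foldl (pvValStep bead e) v) v
        = v.filter (fun e => !pvBad link bead e) := by
  intro s
  induction s with
  | nil =>
    intro v h
    rw [List.foldl_nil]
    symm
    rw [List.filter_eq_self]
    intro a ha
    by_cases hb : pvBad link bead a = true
    · have := h a hb
      simp only [List.count_nil, Nat.le_zero, List.count_eq_zero] at this
      exact absurd ha this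
    · simp [hb]
  | cons e s' ih =>
    intro v h
    rw [List.foldl_cons]
    have hnext : ∀ x, pvBad link bead x = true →
        (link.foldl (pvValStep bead e) v).count x ≤ s'.count x := by
      intro x hx
      by_cases hxe : x = e
      · subst hxe
        have h1 := pvValFold_count_self bead x link v hx
        have h2 := h x hx
        rw [List.count_cons] at h2
        simp only [BEq.rfl, if_true] at h2
        omega
      · rw [pvValFold_count_other bead e link v x hxe]
        have h2 := h x hx
        rw [List.count_cons] at h2
        simpa [Ne.symm hxe] using h2
    rw [ih _ hnext]
    by_cases hb : pvBad link bead e = true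
    · exact pvValFold_filter bead e link _ (by simp [hb]) v
    · rw [pvValFold_noop bead e link (by simpa using hb) v]

theorem pvDict_insert_same {d : PySem.Dict String (List String)} {k : String} {v : List String}
    (hnd : (PySem.Dict.keys d).Nodup) (h : PySem.Dict.get? d k = some v) :
    PySem.Dict.insert d k v = d := by
  apply PySem.Dict.ext
  rw [PySem.Dict.items_insert_of_contains _ _ (by rw [PySem.Dict.contains_eq_isSome_get?, h]; rfl)]
  conv_rhs => rw [← List.map_id (PySem.Dict.items d)]
  apply List.map_congr_left
  intro p hp
  by_cases hpk : p.1 == k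
  · have hk : p.1 = k := by simpa using hpk
    obtain ⟨a, b⟩ := p
    simp only at hk
    subst hk
    have h2 := PySem.Dict.get?_of_mem_items d hp hnd
    rw [h] at h2
    simp [Option.some_inj.mp h2]
  · simp [hpk]

theorem pvCoupleStep_eq (bead e : String) (cp : List String × List String)
    {d : PySem.Dict String (List String)} {v : List String}
    (hnd : (PySem.Dict.keys d).Nodup) (h : PySem.Dict.get? d bead = some v) :
    pvCoupleStep bead e d cp = PySem.Dict.insert d bead (pvValStep bead e v cp) := by
  unfold pvCoupleStep pvValStep
  simp only [h]
  split_ifs with h1 h2 h3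
  · rw [PySem.List.remove?_eq_some_erase v e (by simpa using h3)]
    rfl
  all_goals exact (pvDict_insert_same hnd h).symm

theorem pvCoupleFold_eq (bead e : String) (link : List (List String × List String)) :
    ∀ (d : PySem.Dict String (List String)) (v : List String),
      (PySem.Dict.keys d).Nodup → PySem.Dict.get? d bead = some v →
      link.foldl (pvCoupleStep bead e) d
        = PySem.Dict.insert d bead (link.foldl (pvValStep bead e) v) := by
  induction link with
  | nil => intro d v hnd h; exact (pvDict_insert_same hnd h).symm
  | cons cp rest ih =>
    intro d v hnd h
    simp only [List.foldl_cons]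
    rw [pvCoupleStep_eq bead e cp hnd h]
    rw [ih _ (pvValStep bead e v cp) (PySem.Dict.nodup_keys_insert _ _ _ hnd) (PySem.Dict.get?_insert_self _ _ _)]
    rw [PySem.Dict.insert_insert_self]

theorem pvEntryFold_eq (bead : String) (link : List (List String × List String)) :
    ∀ (eplets : List String) (d : PySem.Dict String (List String)) (v : List String),
      (PySem.Dict.keys d).Nodup → PySem.Dict.get? d bead = some v →
      eplets.foldl (fun d e => link.foldl (pvCoupleStep bead e) d) d
        = PySem.Dict.insert d bead (eplets.foldl (fun v e => link.foldl (pvValStep bead e) v) v) := by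
  intro eplets
  induction eplets with
  | nil => intro d v hnd h; exact (pvDict_insert_same hnd h).symm
  | cons e rest ih =>
    intro d v hnd h
    simp only [List.foldl_cons]
    rw [pvCoupleFold_eq bead e link d v hnd h]
    rw [ih _ (link.foldl (pvValStep bead e) v) (PySem.Dict.nodup_keys_insert _ _ _ hnd) (PySem.Dict.get?_insert_self _ _ _)]
    rw [PySem.Dict.insert_insert_self]

theorem pvSet_contains_update (s : PySem.Set String) (xs : List String) (e : String) :
    PySem.Set.contains (PySem.Set.update s xs) e = (PySem.Set.contains s e || xs.contains e) := by
  rw [Bool.eq_iff_iff]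
  simp [PySem.Set.mem_update]

theorem pvBanned_inner (v2 : List String) (b e : String) :
    ∀ (cs : List String) (d : PySem.Dict String (PySem.Set String)),
      PySem.Set.contains (PySem.Dict.getD (cs.foldl (fun d bead => PySem.Dict.insert d bead (PySem.Set.update (PySem.Dict.getD d bead PySem.Set.empty) v2)) d) b PySem.Set.empty) e
        = (PySem.Set.contains (PySem.Dict.getD d b PySem.Set.empty) e || (cs.contains b && v2.contains e)) := by
  intro cs
  induction cs with
  | nil => simp
  | cons c cs' ih =>
    intro d
    simp only [List.foldl_cons]
    rw [ih, PySem.Dict.getD_insert]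
    by_cases hbc : b = c
    · subst hbc
      rw [if_pos rfl, pvSet_contains_update]
      rw [Bool.eq_iff_iff]
      simp
      tauto
    · rw [if_neg hbc, Bool.eq_iff_iff]
      simp [hbc]

theorem pvBanned_contains (link : List (List String × List String)) (b e : String) :
    ∀ d : PySem.Dict String (PySem.Set String),
      PySem.Set.contains (PySem.Dict.getD
        (link.foldl (fun d cp => cp.1.foldl (fun d bead => PySem.Dict.insert d bead (PySem.Set.update (PySem.Dict.getD d bead PySem.Set.empty) cp.2)) d) d) b PySem.Set.empty) e
        = (PySem.Set.contains (PySem.Dict.getD d b PySem.Set.empty) e || pvBad link b e) := by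
  induction link with
  | nil => intro d; simp [pvBad]
  | cons cp rest ih =>
    intro d
    simp only [List.foldl_cons]
    rw [ih, pvBanned_inner, Bool.eq_iff_iff]
    simp [pvBad]
    tauto

theorem pvFold_get?_unchanged {ν : Type} (g : String × List String → ν) :
    ∀ (l : List (String × List String)) (d : PySem.Dict String ν) (k : String), k ∉ l.map Prod.fst →
      PySem.Dict.get? (l.foldl (fun d q => PySem.Dict.insert d q.1 (g q)) d) k = PySem.Dict.get? d k := by
  intro l
  induction l with
  | nil => intro d k _; rfl
  | cons q l' ih =>
    intro d k hk
    simp only [List.map_cons, List.mem_cons, not_or] at hk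
    simp only [List.foldl_cons]
    rw [ih _ k hk.2, PySem.Dict.get?_insert_of_ne _ _ hk.1]

theorem pvFold_get?_mem {ν : Type} (g : String × List String → ν) :
    ∀ (l : List (String × List String)) (d : PySem.Dict String ν) (p : String × List String),
      p ∈ l → (l.map Prod.fst).Nodup →
      PySem.Dict.get? (l.foldl (fun d q => PySem.Dict.insert d q.1 (g q)) d) p.1 = some (g p) := by
  intro l
  induction l with
  | nil => intro d p hp; exact absurd hp (List.not_mem_nil)
  | cons q l' ih =>
    intro d p hp hnd
    simp only [List.map_cons, List.nodup_cons] at hnd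
    simp only [List.foldl_cons]
    rcases List.mem_cons.mp hp with hq | hp'
    · subst hq
      rw [pvFold_get?_unchanged g l' _ p.1 (by simpa using hnd.1)]
      exact PySem.Dict.get?_insert_self _ _ _
    · exact ih _ p hp' hnd.2

theorem pvMiddle (link : List (List String × List String)) :
    ∀ (rest : List (String × List String)) (d : PySem.Dict String (List String)),
      (PySem.Dict.keys d).Nodup → (rest.map Prod.fst).Nodup →
      (∀ p ∈ rest, PySem.Dict.get? d p.1 = some p.2) →
      rest.foldl (fun d p => p.2.foldl (fun d e => link.foldl (pvCoupleStep p.1 e) d) d) d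
        = rest.foldl (fun d p => PySem.Dict.insert d p.1
            (p.2.foldl (fun v e => link.foldl (pvValStep p.1 e) v) p.2)) d := by
  intro rest
  induction rest with
  | nil => intro d _ _ _; rfl
  | cons p rest' ih =>
    intro d hnd hrest hget
    simp only [List.map_cons, List.nodup_cons] at hrest
    simp only [List.foldl_cons]
    rw [pvEntryFold_eq p.1 link p.2 d p.2 hnd (hget p (List.mem_cons_self))]
    refine ih _ (PySem.Dict.nodup_keys_insert _ _ _ hnd) hrest.2 ?_
    intro q hq
    rw [PySem.Dict.get?_insert_of_ne _ _ (fun hne => hrest.1 (by rw [← hne]; exact List.mem_map_of_mem hq))]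
    exact hget q (List.mem_cons_of_mem _ hq)



theorem pvSet_update_self (s : PySem.Set String) (xs : List String) (h : ∀ x ∈ xs, x ∈ s) :
    PySem.Set.update s xs = s := by
  rw [PySem.Set.update_eq_append_filter]
  have hnil : List.filter (fun y => !PySem.Set.contains s y) (PySem.Set.ofList xs) = [] := by
    rw [List.filter_eq_nil_iff]
    intro a ha
    have hm := h a ((PySem.Set.mem_ofList xs a).mp ha)
    simpa using hm
  rw [hnil, List.append_nil]

theorem pvA_eq (eob : List (String × List String)) (link : List (List String × List String))
    (hnd1 : (eob.map Prod.fst).Nodup) :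
    purge_eplet_on_bead eob link
      = eob.map (fun p => (p.1, PySem.Set.ofList (p.2.filter (fun e => !pvBad link p.1 e)))) := by
  simp only [purge_eplet_on_bead]
  have hnd0 : (PySem.Dict.keys (eob.foldl (fun d p => PySem.Dict.insert d p.1 p.2) (PySem.Dict.empty : PySem.Dict String (List String)))).Nodup :=
    PySem.Dict.nodup_keys_foldl_insert_key eob Prod.fst (fun _ p => p.2) _ PySem.Dict.nodup_keys_empty
  rw [pvMiddle link eob _ hnd0 hnd1 (fun p hp => pvFold_get?_mem Prod.snd eob _ p hp hnd1)]
  have hkeys0 : PySem.Dict.keys (eob.foldl (fun d p => PySem.Dict.insert d p.1 p.2) (PySem.Dict.empty : PySem.Dict String (List String))) = eob.map Prod.fst := by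
    rw [PySem.Dict.keys_foldl_insert_key eob Prod.fst (fun _ p => p.2) _, PySem.Dict.keys_empty,
      PySem.Set.update_nil_left, PySem.Set.ofList_eq_self_of_nodup _ hnd1]
  have hnd1' : (PySem.Dict.keys (eob.foldl (fun d p => PySem.Dict.insert d p.1
      (p.2.foldl (fun v e => link.foldl (pvValStep p.1 e) v) p.2))
      (eob.foldl (fun d p => PySem.Dict.insert d p.1 p.2) PySem.Dict.empty))).Nodup :=
    PySem.Dict.nodup_keys_foldl_insert_key eob Prod.fst _ _ hnd0
  have hkeys1 : PySem.Dict.keys (eob.foldl (fun d p => PySem.Dict.insert d p.1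
      (p.2.foldl (fun v e => link.foldl (pvValStep p.1 e) v) p.2))
      (eob.foldl (fun d p => PySem.Dict.insert d p.1 p.2) PySem.Dict.empty)) = eob.map Prod.fst := by
    rw [PySem.Dict.keys_foldl_insert_key eob Prod.fst _ _, hkeys0]
    exact pvSet_update_self _ _ (fun x hx => hx)
  rw [PySem.Dict.items_eq_map_keys _ hnd1' [], hkeys1, List.map_map, List.map_map]
  apply List.map_congr_left
  intro p hp
  simp only [Function.comp]
  rw [PySem.Dict.getD_eq_get?_getD,
    pvFold_get?_mem (fun p => p.2.foldl (fun v e => link.foldl (pvValStep p.1 e) v) p.2) eob _ p hp hnd1,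
    Option.getD_some]
  rw [pvStream_filter p.1 link p.2 p.2 (fun e _ => le_refl _)]

theorem pvB_eq (eob : List (String × List String)) (link : List (List String × List String))
    (hnd1 : (eob.map Prod.fst).Nodup) :
    purge_eplet_on_bead_alt eob link
      = eob.map (fun p => (p.1, PySem.Set.ofList (p.2.filter (fun e => !pvBad link p.1 e)))) := by
  simp only [purge_eplet_on_bead_alt]
  rw [PySem.Dict.items_foldl_insert_fresh eob Prod.fst _ PySem.Dict.empty
    (fun a _ => PySem.Dict.contains_empty a.1) hnd1]
  rw [show (PySem.Dict.empty : PySem.Dict String (PySem.Set String)).items = [] from rfl,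
    List.nil_append]
  apply List.map_congr_left
  intro p hp
  congr 2
  apply List.filter_congr
  intro e _
  rw [pvBanned_contains link p.1 e PySem.Dict.empty, PySem.Dict.getD_empty]
  rfl

-- ===== VERDICT (by name: the statement is the Claim_ definition above) =====
theorem purge_eplet_on_bead_spec : Claim_equal_purge_eplet_on_bead := by
  intro eplet_on_bead eplet_on_link _hdom hpre
  unfold Spec_purge_eplet_on_bead
  rw [pvA_eq eplet_on_bead eplet_on_link hpre.1, pvB_eq eplet_on_bead eplet_on_link hpre.1]
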